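-- pv_equiv track=rewrite | github.com/wyuinche/Problem_Solving | book346_kakao.py | makeCorrect
-- ===== SOURCE A (Python) =====
-- def makeCorrect(w):
--     if w == '':
--         return ''
--     u, v = split(w)
--     if isCorrect(u):
--         u += makeCorrect(v)
--         answer = u
--     else:
--         answer = '(' + makeCorrect(v) + ')' + makeOpposite(u[1:-1])
--     return answer
--
-- def makeOpposite(w):
--     result = ''
--     for c in w:
--         if c == '(':
--             result += ')'
--         else:
--             result += '('
--     return result
--
-- def split(w):
--     left_n = 0
--     right_n = 0
--     idx = 0
--     for c in w:
--         idx += 1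
--         if c == '(':
--             left_n += 1
--         elif c == ')':
--             right_n += 1
--         if left_n == right_n:
--             return w[:idx], w[idx:]
--
-- def isCorrect(u):
--     stack = []
--     for c in u:
--         if c == '(':
--             stack.append(c)
--         elif c == ')':
--             if not stack:
--                 return False
--             stack.pop()
--     return True
-- ===== SOURCE B (Python) =====
-- # Iterative single pass over indices with an explicit pending stack and list-buffer join
-- # instead of A's recursion with repeated slicing and string concatenation.
-- def makeCorrect(w):
--     n = len(w)
--     out = []
--     pending = []
--     i = 0
--     while i < n:
--         bal = 0
--         k = i
--         while True:
--             c = w[k]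
--             if c == '(':
--                 bal += 1
--             elif c == ')':
--                 bal -= 1
--             k += 1
--             if bal == 0:
--                 break
--         u = w[i:k]
--         if _nonneg(u):
--             out.append(u)
--         else:
--             out.append('(')
--             pending.append((i, k))
--         i = k
--     while pending:
--         i0, k = pending.pop()
--         out.append(')')
--         out.append(''.join(')' if c == '(' else '(' for c in w[i0+1:k-1]))
--     return ''.join(out)
--
-- def _nonneg(u):
--     bal = 0
--     for c in u:
--         if c == '(':
--             bal += 1
--         elif c == ')':
--             bal -= 1
--             if bal < 0:
--                 return False
--     return True
-- ===== Notes on version B (the rewrite author's own statement) =====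
-- stated objective: faster
-- what changed: A's recursion with repeated string slicing and '+' concatenation is replaced by a single left-to-right index scan that finds each balanced block once, keeps an explicit pending stack of (start,end) pairs for the recursive case, and joins list buffers at the end.
import Mathlib
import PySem

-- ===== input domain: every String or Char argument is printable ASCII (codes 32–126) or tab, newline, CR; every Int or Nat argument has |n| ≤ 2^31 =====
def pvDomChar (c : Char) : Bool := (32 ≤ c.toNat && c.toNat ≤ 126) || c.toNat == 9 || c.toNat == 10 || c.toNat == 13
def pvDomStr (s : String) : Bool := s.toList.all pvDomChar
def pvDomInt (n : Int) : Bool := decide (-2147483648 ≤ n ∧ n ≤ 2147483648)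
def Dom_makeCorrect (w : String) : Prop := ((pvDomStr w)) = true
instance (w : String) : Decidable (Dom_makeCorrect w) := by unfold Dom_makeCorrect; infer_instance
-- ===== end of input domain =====

-- B replaces A's recursion with repeated slicing and string concatenation by a single
-- left-to-right index scan with an explicit pending stack and a list buffer (join at the end).

-- ===== PORT A =====
-- split: returns the first idx (≥ 1) at which the '('/')' counts agree, as in Python's loop;
-- none = Python's split returned None (then the caller's unpacking raises TypeError).
def splitIdxA : List Char → Int → Int → Nat → Option Nat
  | [], _, _, _ => none
  | c :: rest, l, r, idx =>
    let l' := if c = '(' then l + 1 else l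
    let r' := if c = ')' then r + 1 else r
    if l' = r' then some (idx + 1) else splitIdxA rest l' r' (idx + 1)

def isCorrectA : List Char → List Char → Bool
  | [], _ => true
  | c :: rest, stack =>
    if c = '(' then isCorrectA rest (c :: stack)
    else if c = ')' then
      match stack with
      | [] => false
      | _ :: st => isCorrectA rest st
    else isCorrectA rest stack

def makeOppositeA (w : List Char) : List Char :=
  w.foldl (fun res c => res ++ [if c = '(' then ')' else '(']) []

-- fuel = |w| suffices: every recursive call strictly shortens the string (idx ≥ 1).
-- u[1:-1] is ported as (u.drop 1).dropLast (exact for Python's slice on any list).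
def mcA : Nat → List Char → List Char
  | 0, _ => []
  | fuel + 1, w =>
    if w = [] then []
    else
      match splitIdxA w 0 0 0 with
      | none => []   -- Python: split returns None and unpacking raises; excluded by Pre_
      | some idx =>
        let u := w.take idx
        let v := w.drop idx
        if isCorrectA u [] then u ++ mcA fuel v
        else '(' :: (mcA fuel v ++ [')'] ++ makeOppositeA ((u.drop 1).dropLast))

def makeCorrect (w : String) : String := String.ofList (mcA w.toList.length w.toList)

-- ===== PORT B =====
def flipB (c : Char) : Char := if c = '(' then ')' else '('

-- the inner `while True` of Source B; fuel bounds the scan, none-lookup = Python IndexError (outside Pre_)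
def scanKB (w : List Char) : Nat → Nat → Int → Nat
  | 0, k, _ => k
  | fuel + 1, k, bal =>
    match w[k]? with
    | none => k
    | some c =>
      let bal' := if c = '(' then bal + 1 else if c = ')' then bal - 1 else bal
      if bal' = 0 then k + 1 else scanKB w fuel (k + 1) bal'

def okB : List Char → Int → Bool
  | [], _ => true
  | c :: rest, bal =>
    if c = '(' then okB rest (bal + 1)
    else if c = ')' then (if bal - 1 < 0 then false else okB rest (bal - 1))
    else okB rest bal

-- the final `while pending` drain loop; pending is a cons-stack (append = cons, pop = head)
def drainB (w : List Char) : List (Nat × Nat) → List Char → List Char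
  | [], out => out
  | (i0, k) :: rest, out =>
    drainB w rest (out ++ [')'] ++ (((w.drop (i0 + 1)).take (k - 1 - (i0 + 1))).map flipB))

-- the main `while i < n` loop; fuel = |w| suffices (i advances by ≥ 1 each iteration)
def mainB (w : List Char) : Nat → Nat → List Char → List (Nat × Nat) → List Char
  | 0, _, out, pending => drainB w pending out
  | fuel + 1, i, out, pending =>
    if i < w.length then
      let k := scanKB w (w.length - i) i 0
      let u := (w.drop i).take (k - i)
      if okB u 0 then mainB w fuel k (out ++ u) pending
      else mainB w fuel k (out ++ ['(']) ((i, k) :: pending)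
    else drainB w pending out

def makeCorrect_alt (w : String) : String :=
  String.ofList (mainB w.toList w.toList.length 0 [] [])

-- ===== PRECONDITION & SPEC =====
-- Pre_ excludes exactly the inputs on which Python A raises: whenever some suffix to be split
-- has unequal '(' / ')' counts, split returns None and `u, v = split(w)` raises TypeError;
-- A returns normally exactly when the counts are equal.
def Pre_makeCorrect (w : String) : Prop := w.toList.count '(' = w.toList.count ')'
instance (w : String) : Decidable (Pre_makeCorrect w) := by unfold Pre_makeCorrect; infer_instance

def pvWitness_makeCorrect : String := "(()())"

def Spec_makeCorrect (w : String) (out : String) : Prop := out = makeCorrect_alt w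
instance (w : String) (out : String) : Decidable (Spec_makeCorrect w out) := by unfold Spec_makeCorrect; infer_instance

-- ===== CLAIM (what is proved, stated in full; the proofs are below) =====
def Claim_equal_makeCorrect : Prop := ∀ (w : String), Dom_makeCorrect w → Pre_makeCorrect w → Spec_makeCorrect w (makeCorrect w)

-- ===== LEMMAS AND PROOFS =====

def chDelta (c : Char) : Int := if c = '(' then 1 else if c = ')' then -1 else 0

def balOf : List Char → Int
  | [] => 0
  | c :: rest => chDelta c + balOf rest

lemma balOf_append (a b : List Char) : balOf (a ++ b) = balOf a + balOf b := by
  induction a with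
  | nil => simp [balOf]
  | cons c r ih => simp [balOf, ih]; ring

lemma balOf_eq_counts (l : List Char) :
    balOf l = (l.count '(' : Int) - (l.count ')' : Int) := by
  induction l with
  | nil => simp [balOf]
  | cons c r ih =>
    simp [balOf, chDelta, ih, List.count_cons]
    by_cases h1 : c = '(' <;> by_cases h2 : c = ')' <;>
      simp [h1, h2] at * <;> push_cast <;> omega

lemma mcA_nil (f : Nat) : mcA f [] = [] := by cases f <;> simp [mcA]

lemma splitIdxA_bounds : ∀ (s : List Char) (l r : Int) (idx j : Nat),
    splitIdxA s l r idx = some j → idx + 1 ≤ j ∧ j ≤ idx + s.length := by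
  intro s
  induction s with
  | nil => intro l r idx j h; simp [splitIdxA] at h
  | cons c rest ih =>
    intro l r idx j h
    simp only [splitIdxA] at h
    by_cases hc : (if c = '(' then l + 1 else l) = (if c = ')' then r + 1 else r)
    · rw [if_pos hc] at h
      simp only [Option.some.injEq] at h
      simp only [List.length_cons]
      omega
    · rw [if_neg hc] at h
      have := ih _ _ _ _ h
      simp only [List.length_cons]
      omega

lemma mcA_fuel : ∀ (f f' : Nat) (s : List Char), s.length ≤ f → s.length ≤ f' →
    mcA f s = mcA f' s := by
  intro f
  induction f with
  | zero =>
    intro f' s h _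
    have : s = [] := by cases s <;> simp_all
    simp [this, mcA_nil]
  | succ f ih =>
    intro f' s h h'
    cases f' with
    | zero =>
      have : s = [] := by cases s <;> simp_all
      simp [this, mcA_nil]
    | succ f'' =>
      by_cases hs : s = []
      · simp [hs, mcA_nil]
      · simp only [mcA, hs]
        cases hsp : splitIdxA s 0 0 0 with
        | none => simp
        | some idx =>
          have hb := splitIdxA_bounds s 0 0 0 idx hsp
          have hv : (s.drop idx).length ≤ f ∧ (s.drop idx).length ≤ f'' := by
            simp [List.length_drop]; omega
          simp only []
          rw [ih f'' (s.drop idx) hv.1 hv.2]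

-- isCorrect's stack只 matters through its size
lemma isCorrect_eq_ok : ∀ (s : List Char) (st : List Char),
    isCorrectA s st = okB s (st.length : Int) := by
  intro s
  induction s with
  | nil => intro st; simp [isCorrectA, okB]
  | cons c rest ih =>
    intro st
    by_cases h1 : c = '('
    · subst h1
      have hL : isCorrectA ('(' :: rest) st = isCorrectA rest ('(' :: st) := rfl
      have hR : okB ('(' :: rest) (st.length : Int) = okB rest ((st.length : Int) + 1) := rfl
      have hlen : ((('(' : Char) :: st).length : Int) = (st.length : Int) + 1 := by
        push_cast [List.length_cons]
        ring
      rw [hL, hR, ih ('(' :: st), hlen]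
    · by_cases h2 : c = ')'
      · subst h2
        cases st with
        | nil =>
          have hL : isCorrectA (')' :: rest) [] = false := rfl
          have hR : okB (')' :: rest) ((([] : List Char).length : Int)) =
              (if ((0 : Int)) - 1 < 0 then false else okB rest ((0 : Int) - 1)) := rfl
          rw [hL, hR, if_pos (by norm_num)]
        | cons x st' =>
          have hL : isCorrectA (')' :: rest) (x :: st') = isCorrectA rest st' := rfl
          have hR : okB (')' :: rest) (((x :: st').length : Int)) =
              (if ((x :: st').length : Int) - 1 < 0 then false
               else okB rest (((x :: st').length : Int) - 1)) := rfl
          have hb : (((x :: st').length : Int)) - 1 = (st'.length : Int) := by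
            push_cast [List.length_cons]
            ring
          rw [hL, hR, hb, if_neg (by omega), ih st']
      · have hL : isCorrectA (c :: rest) st = isCorrectA rest st := by
          simp [isCorrectA, h1, h2]
        have hR : okB (c :: rest) (st.length : Int) = okB rest (st.length : Int) := by
          simp [okB, h1, h2]
        rw [hL, hR, ih st]

lemma foldl_app_map (g : Char → Char) : ∀ (l : List Char) (acc : List Char),
    l.foldl (fun res c => res ++ [g c]) acc = acc ++ l.map g := by
  intro l
  induction l with
  | nil => intro acc; simp
  | cons c r ih => intro acc; simp [ih]

lemma makeOppositeA_eq_map (l : List Char) : makeOppositeA l = l.map flipB := by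
  unfold makeOppositeA flipB
  rw [foldl_app_map _ l []]
  simp

lemma drainB_out' : ∀ (pend : List (Nat × Nat)) (w : List Char) (out₁ out₂ : List Char),
    drainB w pend (out₁ ++ out₂) = out₁ ++ drainB w pend out₂ := by
  intro pend
  induction pend with
  | nil => intro w out₁ out₂; simp [drainB]
  | cons p rest ih =>
    intro w out₁ out₂
    obtain ⟨i0, k⟩ := p
    simp only [drainB]
    rw [List.append_assoc, List.append_assoc, ← List.append_assoc out₂]
    exact ih w out₁ _

lemma drainB_out (pend : List (Nat × Nat)) (w : List Char) (out : List Char) :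
    drainB w pend out = out ++ drainB w pend [] := by
  have h := drainB_out' pend w out []
  rwa [List.append_nil] at h

-- the split scan of A and the index scan of B agree, and the block found has balance 0
lemma scan_split : ∀ (s : List Char) (w : List Char) (f : Nat) (l r : Int) (idx i : Nat),
    s = w.drop i → s ≠ [] → s.length ≤ f → (l - r) + balOf s = 0 →
    ∃ j, splitIdxA s l r idx = some (idx + j) ∧ scanKB w f i (l - r) = i + j ∧
         1 ≤ j ∧ j ≤ s.length ∧ balOf (s.take j) = -(l - r) := by
  intro s
  induction s with
  | nil => intro _ _ _ _ _ _ _ hne _ _; exact absurd rfl hne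
  | cons c rest ih =>
    intro w f l r idx i hdrop hne hlen hbal
    cases f with
    | zero => simp at hlen
    | succ f0 =>
      have hget : w[i]? = some c := by
        have : (w.drop i).head? = some c := by rw [← hdrop]; rfl
        rwa [List.head?_drop] at this
      have hrest : rest = w.drop (i + 1) := by
        have h : w.drop (i + 1) = (w.drop i).tail := by
          rw [List.tail_drop]
        rw [h, ← hdrop]
        rfl
      have hdelta : (if c = '(' then l + 1 else l) - (if c = ')' then r + 1 else r)
          = (l - r) + chDelta c := by
        unfold chDelta
        by_cases h1 : c = '(' <;> by_cases h2 : c = ')' <;> simp_all <;> ring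
      have hbal' : (if c = '(' then (l - r) + 1 else if c = ')' then (l - r) - 1 else (l - r))
          = (l - r) + chDelta c := by
        unfold chDelta
        by_cases h1 : c = '(' <;> by_cases h2 : c = ')' <;> simp_all <;> ring
      by_cases hz : (l - r) + chDelta c = 0
      · refine ⟨1, ?_, ?_, by omega, by simp, ?_⟩
        · simp only [splitIdxA]
          rw [if_pos (by omega)]
        · simp only [scanKB, hget]
          rw [hbal', if_pos hz]
        · simp [balOf, chDelta] at *
          omega
      · have hrne : rest ≠ [] := by
          intro h
          rw [h] at hbal
          simp [balOf] at hbal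
          exact hz (by omega)
        have hbal2 : ((if c = '(' then l + 1 else l) - (if c = ')' then r + 1 else r)) + balOf rest = 0 := by
          rw [hdelta]
          simp [balOf] at hbal
          omega
        obtain ⟨j, hsp, hsc, hj1, hjle, hbt⟩ :=
          ih w f0 (if c = '(' then l + 1 else l) (if c = ')' then r + 1 else r)
            (idx + 1) (i + 1) hrest hrne (by simp at hlen ⊢; omega) hbal2
        refine ⟨j + 1, ?_, ?_, by omega, by simp; omega, ?_⟩
        · simp only [splitIdxA]
          rw [if_neg (by omega), hsp]
          congr 1; omega
        · simp only [scanKB, hget]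
          rw [hbal', if_neg hz, ← hdelta]
          rw [hsc]; omega
        · simp only [List.take_succ_cons, balOf]
          rw [hbt, hdelta] at *
          simp [balOf] at hbal
          omega

lemma mainB_eq : ∀ (f : Nat) (w : List Char) (i : Nat) (out : List Char) (pend : List (Nat × Nat)),
    w.length - i ≤ f → balOf (w.drop i) = 0 →
    mainB w f i out pend = out ++ mcA (w.length - i) (w.drop i) ++ drainB w pend [] := by
  intro f
  induction f with
  | zero =>
    intro w i out pend hf _
    have hi : w.length ≤ i := by omega
    have : w.drop i = [] := List.drop_eq_nil_of_le hi
    simp [mainB, this, mcA_nil, Nat.sub_eq_zero_of_le hi, drainB_out pend w out]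
  | succ f ih =>
    intro w i out pend hf hbal
    by_cases hi : i < w.length
    · set s := w.drop i with hs
      have hslen : s.length = w.length - i := by simp [hs]
      have hsne : s ≠ [] := by
        intro h; rw [h] at hslen; simp at hslen; omega
      obtain ⟨j, hsp, hsc, hj1, hjle, hbt⟩ :=
        scan_split s w (w.length - i) 0 0 0 i hs hsne (by omega) (by simpa using hbal)
      rw [Nat.zero_add] at hsp
      norm_num at hbt hsc
      have hk : scanKB w (w.length - i) i 0 = i + j := hsc
      simp only [mainB, if_pos hi, hk]
      have hkj : i + j - i = j := by omega
      rw [hkj]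
      -- unfold mcA on the A side
      have hnf : w.length - i = (w.length - i - 1) + 1 := by omega
      have hA : mcA (w.length - i) s =
          (if isCorrectA (s.take j) [] then s.take j ++ mcA (w.length - i - 1) (s.drop j)
           else '(' :: (mcA (w.length - i - 1) (s.drop j) ++ [')'] ++
             makeOppositeA (((s.take j).drop 1).dropLast))) := by
        conv_lhs => rw [hnf]
        simp only [mcA, hsne, hsp]
        simp
      have hdropk : w.drop (i + j) = s.drop j := by
        rw [hs, List.drop_drop]
      have hbal2 : balOf (w.drop (i + j)) = 0 := by
        rw [hdropk]
        have := balOf_append (s.take j) (s.drop j)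
        rw [List.take_append_drop] at this
        rw [hbt] at this
        omega
      have hfuel2 : w.length - (i + j) ≤ f := by omega
      have hok : isCorrectA (s.take j) [] = okB (s.take j) 0 := by
        have := isCorrect_eq_ok (s.take j) []
        simpa using this
      have hfe : mcA (w.length - i - 1) (s.drop j) = mcA (w.length - (i + j)) (s.drop j) := by
        apply mcA_fuel
        · simp [hslen]; omega
        · simp [hslen]; omega
      by_cases hcor : okB (s.take j) 0 = true
      · rw [if_pos hcor]
        rw [ih w (i + j) (out ++ s.take j) pend hfuel2 hbal2]
        rw [hA, hok, if_pos hcor, hfe, hdropk]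
        simp
      · rw [if_neg hcor]
        rw [ih w (i + j) (out ++ ['(']) ((i, i + j) :: pend) hfuel2 hbal2]
        rw [hA, hok, if_neg hcor, hfe, hdropk]
        -- interiors agree
        have hint : (w.drop (i + 1)).take (i + j - 1 - (i + 1)) = ((s.take j).drop 1).dropLast := by
          have h1 : (s.take j).drop 1 = (w.drop (i + 1)).take (j - 1) := by
            rw [List.drop_take, hs, List.drop_drop]
          have hlen2 : j - 1 ≤ (w.drop (i + 1)).length := by
            simp [List.length_drop]
            omega
          rw [h1, List.dropLast_eq_take, List.length_take, List.length_drop]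
          rw [List.take_take]
          congr 1
          omega
        rw [drainB_out ((i, i + j) :: pend) w]
        simp only [drainB]
        rw [drainB_out pend w, hint, makeOppositeA_eq_map]
        simp
    · have : w.drop i = [] := List.drop_eq_nil_of_le (by omega)
      simp [mainB, hi, this, mcA_nil, Nat.sub_eq_zero_of_le (by omega : w.length ≤ i),
        drainB_out pend w out]

-- ===== VERDICT (by name: the statement is the Claim_ definition above) =====
theorem makeCorrect_spec : Claim_equal_makeCorrect := by
  unfold Claim_equal_makeCorrect
  intro w _ hpre
  unfold Spec_makeCorrect makeCorrect makeCorrect_alt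
  have hbal : balOf w.toList = 0 := by
    rw [balOf_eq_counts]
    unfold Pre_makeCorrect at hpre
    omega
  rw [mainB_eq w.toList.length w.toList 0 [] [] (by omega) (by simpa using hbal)]
  simp [drainB]
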